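-- pv_equiv track=rewrite | github.com/nicolas-schwind/TF-map-solver | map-generation-visualisation/coloredmaptype.py | to_refined_type
-- ===== SOURCE A (Python) =====
-- SEA = [65, 105, 225]
--
-- DENSELY_POPULATED = [178, 154, 115]
--
-- MODERATELY_POPULATED = [198, 174, 135]
--
-- LOOSELY_POPULATED = [218, 194, 155]
--
-- DESERT = [238, 214, 175]
--
-- MOUNTAIN = [235, 235, 235]
--
-- def to_refined_type(source_grid):
--     result = []
--     grid_length = len(source_grid)
--     for x in range(grid_length):
--         line = []
--         for y in range(grid_length):
--             if source_grid[x][y] < 90: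
--                 line.append(SEA)
--             elif source_grid[x][y] < 100:
--                 line.append(DENSELY_POPULATED)
--             elif source_grid[x][y] < 120:
--                 line.append(MODERATELY_POPULATED)
--             elif source_grid[x][y] < 140:
--                 line.append(LOOSELY_POPULATED)
--             elif source_grid[x][y] < 180:
--                 line.append(DESERT)
--             elif source_grid[x][y] < 200:
--                 line.append(LOOSELY_POPULATED)
--             else:
--                 line.append(MOUNTAIN)
--         result.append(line)
--     return result
-- ===== SOURCE B (Python) =====
-- SEA = [65, 105, 225]
-- DENSELY_POPULATED = [178, 154, 115]
-- MODERATELY_POPULATED = [198, 174, 135]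
-- LOOSELY_POPULATED = [218, 194, 155]
-- DESERT = [238, 214, 175]
-- MOUNTAIN = [235, 235, 235]
--
-- _THRESHOLDS = [90, 100, 120, 140, 180, 200]
-- _COLORS = [SEA, DENSELY_POPULATED, MODERATELY_POPULATED, LOOSELY_POPULATED,
--            DESERT, LOOSELY_POPULATED, MOUNTAIN]
--
-- def _color(v):
--     # category index = number of thresholds not exceeding v
--     return _COLORS[sum(1 for t in _THRESHOLDS if t <= v)]
--
-- def to_refined_type(source_grid):
--     n = len(source_grid)
--     # pass 1: memoise the color of every distinct cell value once
--     cache = {}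
--     for row in source_grid:
--         for v in row[:n]:
--             if v not in cache:
--                 cache[v] = _color(v)
--     # pass 2: substitute through the memo
--     return [[cache[v] for v in row[:n]] for row in source_grid]
-- ===== Notes on version B (the rewrite author's own statement) =====
-- stated objective: alternative
-- what changed: B is a two-phase memoised rewrite: a first pass builds a dict mapping each distinct cell value to its color (category index obtained by counting thresholds <= value), then a second pass substitutes rows (sliced to the grid width) through that memo; A instead classifies every cell inline with a seven-branch if/elif chain inside index-driven append loops.
import Mathlib
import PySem

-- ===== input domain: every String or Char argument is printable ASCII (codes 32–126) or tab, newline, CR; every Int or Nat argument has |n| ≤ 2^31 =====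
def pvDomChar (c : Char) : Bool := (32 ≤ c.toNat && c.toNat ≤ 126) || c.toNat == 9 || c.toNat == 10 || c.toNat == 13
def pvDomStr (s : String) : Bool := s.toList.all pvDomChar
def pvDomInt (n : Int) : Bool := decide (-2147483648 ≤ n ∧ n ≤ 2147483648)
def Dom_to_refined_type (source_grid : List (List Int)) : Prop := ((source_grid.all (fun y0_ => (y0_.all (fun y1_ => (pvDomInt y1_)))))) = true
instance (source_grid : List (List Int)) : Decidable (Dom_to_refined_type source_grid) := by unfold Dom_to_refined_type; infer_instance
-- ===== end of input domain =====

-- B rewrites A's inline if/elif classification as two staged passes — a dict memo from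
-- distinct cell values to colors (index = count of thresholds ≤ value) built first, then
-- rows sliced to the grid width substituted through it (alternative, same cost).

-- ===== PORT A =====
def SEA : List Int := [65, 105, 225]
def DENSELY_POPULATED : List Int := [178, 154, 115]
def MODERATELY_POPULATED : List Int := [198, 174, 135]
def LOOSELY_POPULATED : List Int := [218, 194, 155]
def DESERT : List Int := [238, 214, 175]
def MOUNTAIN : List Int := [235, 235, 235]

def to_refined_type (source_grid : List (List Int)) : List (List (List Int)) :=
  let grid_length : Int := PySem.List.len source_grid
  (PySem.List.pyRange 0 grid_length 1).foldl (fun result x =>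
    result ++ [(PySem.List.pyRange 0 grid_length 1).foldl (fun line y =>
      let v := PySem.List.pyGetD (PySem.List.pyGetD source_grid x []) y 0
      line ++ [if v < 90 then SEA
               else if v < 100 then DENSELY_POPULATED
               else if v < 120 then MODERATELY_POPULATED
               else if v < 140 then LOOSELY_POPULATED
               else if v < 180 then DESERT
               else if v < 200 then LOOSELY_POPULATED
               else MOUNTAIN]) []]) []

-- ===== PORT B =====
def pvThresholds : List Int := [90, 100, 120, 140, 180, 200]
def pvColors : List (List Int) :=
  [SEA, DENSELY_POPULATED, MODERATELY_POPULATED, LOOSELY_POPULATED, DESERT, LOOSELY_POPULATED, MOUNTAIN]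

-- _color(v): index = sum(1 for t in _THRESHOLDS if t <= v)
def pvColorOf (v : Int) : List Int :=
  PySem.List.pyGetD pvColors
    (pvThresholds.foldl (fun acc t => acc + (if t ≤ v then 1 else 0)) (0 : Int)) []

def to_refined_type_alt (source_grid : List (List Int)) : List (List (List Int)) :=
  let n : Int := PySem.List.len source_grid
  -- pass 1: memoise the color of every distinct cell value once
  let cache : PySem.Dict Int (List Int) :=
    source_grid.foldl (fun c row =>
      (PySem.List.slice row none (some n)).foldl
        (fun c v => if c.contains v then c else c.insert v (pvColorOf v)) c)
      PySem.Dict.empty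
  -- pass 2: substitute through the memo
  source_grid.map (fun row =>
    (PySem.List.slice row none (some n)).map (fun v => cache.getD v []))

-- ===== PRECONDITION & SPEC =====
-- Pre_ excludes exactly the inputs where A raises IndexError: a row shorter than the
-- number of rows (A indexes every row at columns 0..len(grid)-1).
def Pre_to_refined_type (source_grid : List (List Int)) : Prop :=
  ∀ row ∈ source_grid, source_grid.length ≤ row.length
instance (source_grid : List (List Int)) : Decidable (Pre_to_refined_type source_grid) := by unfold Pre_to_refined_type; infer_instance
def pvWitness_to_refined_type : List (List Int) := [[50, 130], [95, 250]]

def Spec_to_refined_type (source_grid : List (List Int)) (out : List (List (List Int))) : Prop := out = to_refined_type_alt source_grid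
instance (source_grid : List (List Int)) (out : List (List (List Int))) : Decidable (Spec_to_refined_type source_grid out) := by unfold Spec_to_refined_type; infer_instance

-- ===== CLAIM =====
def Claim_equal_to_refined_type : Prop := ∀ (source_grid : List (List Int)), Dom_to_refined_type source_grid → Pre_to_refined_type source_grid → Spec_to_refined_type source_grid (to_refined_type source_grid)

-- ===== LEMMAS AND PROOFS =====

-- A's if/elif chain, as a function of the cell value
def pvChain (v : Int) : List Int :=
  if v < 90 then SEA
  else if v < 100 then DENSELY_POPULATED
  else if v < 120 then MODERATELY_POPULATED
  else if v < 140 then LOOSELY_POPULATED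
  else if v < 180 then DESERT
  else if v < 200 then LOOSELY_POPULATED
  else MOUNTAIN

-- counting thresholds ≤ v and indexing the table computes A's chain
lemma colorOf_eq_chain (v : Int) : pvColorOf v = pvChain v := by
  have hidx : pvThresholds.foldl (fun acc t => acc + (if t ≤ v then 1 else 0)) (0 : Int) =
      (if v < 90 then 0 else if v < 100 then 1 else if v < 120 then 2 else if v < 140 then 3
       else if v < 180 then 4 else if v < 200 then 5 else 6) := by
    simp only [pvThresholds, List.foldl_cons, List.foldl_nil]
    have hpos : ∀ t : Int, t ≤ v → (if t ≤ v then (1:Int) else 0) = 1 := fun t h => if_pos h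
    have hneg : ∀ t : Int, ¬ t ≤ v → (if t ≤ v then (1:Int) else 0) = 0 := fun t h => if_neg h
    rcases lt_or_ge v 90 with h1 | h1
    · rw [hneg 90 (by omega), hneg 100 (by omega), hneg 120 (by omega), hneg 140 (by omega),
          hneg 180 (by omega), hneg 200 (by omega), if_pos h1]
      norm_num
    rcases lt_or_ge v 100 with h2 | h2
    · rw [hpos 90 (by omega), hneg 100 (by omega), hneg 120 (by omega), hneg 140 (by omega),
          hneg 180 (by omega), hneg 200 (by omega), if_neg (show ¬ v < 90 by omega), if_pos h2]
      norm_num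
    rcases lt_or_ge v 120 with h3 | h3
    · rw [hpos 90 (by omega), hpos 100 (by omega), hneg 120 (by omega), hneg 140 (by omega),
          hneg 180 (by omega), hneg 200 (by omega), if_neg (show ¬ v < 90 by omega),
          if_neg (show ¬ v < 100 by omega), if_pos h3]
      norm_num
    rcases lt_or_ge v 140 with h4 | h4
    · rw [hpos 90 (by omega), hpos 100 (by omega), hpos 120 (by omega), hneg 140 (by omega),
          hneg 180 (by omega), hneg 200 (by omega), if_neg (show ¬ v < 90 by omega),
          if_neg (show ¬ v < 100 by omega), if_neg (show ¬ v < 120 by omega), if_pos h4]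
      norm_num
    rcases lt_or_ge v 180 with h5 | h5
    · rw [hpos 90 (by omega), hpos 100 (by omega), hpos 120 (by omega), hpos 140 (by omega),
          hneg 180 (by omega), hneg 200 (by omega), if_neg (show ¬ v < 90 by omega),
          if_neg (show ¬ v < 100 by omega), if_neg (show ¬ v < 120 by omega),
          if_neg (show ¬ v < 140 by omega), if_pos h5]
      norm_num
    rcases lt_or_ge v 200 with h6 | h6
    · rw [hpos 90 (by omega), hpos 100 (by omega), hpos 120 (by omega), hpos 140 (by omega),
          hpos 180 (by omega), hneg 200 (by omega), if_neg (show ¬ v < 90 by omega),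
          if_neg (show ¬ v < 100 by omega), if_neg (show ¬ v < 120 by omega),
          if_neg (show ¬ v < 140 by omega), if_neg (show ¬ v < 180 by omega), if_pos h6]
      norm_num
    · rw [hpos 90 (by omega), hpos 100 (by omega), hpos 120 (by omega), hpos 140 (by omega),
          hpos 180 (by omega), hpos 200 (by omega), if_neg (show ¬ v < 90 by omega),
          if_neg (show ¬ v < 100 by omega), if_neg (show ¬ v < 120 by omega),
          if_neg (show ¬ v < 140 by omega), if_neg (show ¬ v < 180 by omega),
          if_neg (show ¬ v < 200 by omega)]
      norm_num
  unfold pvColorOf pvChain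
  rw [hidx]
  split_ifs <;> rfl

def pvStep (c : PySem.Dict Int (List Int)) (v : Int) : PySem.Dict Int (List Int) :=
  if c.contains v then c else c.insert v (pvColorOf v)

def pvGood (c : PySem.Dict Int (List Int)) : Prop :=
  ∀ k, c.contains k = true → c.getD k [] = pvColorOf k

lemma contains_pvStep_mono {c : PySem.Dict Int (List Int)} {k : Int} (h : c.contains k = true)
    (v : Int) : (pvStep c v).contains k = true := by
  unfold pvStep; split_ifs with hc
  · exact h
  · simp [PySem.Dict.contains_insert, h]

lemma good_pvStep {c : PySem.Dict Int (List Int)} (h : pvGood c) (v : Int) :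
    pvGood (pvStep c v) := by
  unfold pvStep; split_ifs with hc
  · exact h
  · intro k hk
    by_cases hkv : k = v
    · subst hkv; rw [PySem.Dict.getD_insert_self]
    · rw [PySem.Dict.getD_insert_of_ne _ _ _ hkv]
      rw [PySem.Dict.contains_insert] at hk
      simp [hkv] at hk
      exact h k hk

lemma good_foldl_pvStep (l : List Int) {c : PySem.Dict Int (List Int)} (h : pvGood c) :
    pvGood (l.foldl pvStep c) := by
  induction l generalizing c with
  | nil => exact h
  | cons x xs ih => exact ih (good_pvStep h x)

lemma contains_foldl_pvStep_mono (l : List Int) {c : PySem.Dict Int (List Int)} {k : Int}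
    (h : c.contains k = true) : (l.foldl pvStep c).contains k = true := by
  induction l generalizing c with
  | nil => exact h
  | cons x xs ih => exact ih (contains_pvStep_mono h x)

lemma contains_foldl_pvStep_of_mem {l : List Int} {v : Int} (hv : v ∈ l)
    (c : PySem.Dict Int (List Int)) : (l.foldl pvStep c).contains v = true := by
  induction l generalizing c with
  | nil => cases hv
  | cons x xs ih =>
    rcases List.mem_cons.mp hv with h | h
    · subst h
      refine contains_foldl_pvStep_mono xs ?_
      unfold pvStep; split_ifs with hc
      · exact hc
      · exact PySem.Dict.contains_insert_self _ _ _
    · exact ih h _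

-- the memo over a flat list of values answers pvColorOf on every member
lemma cache_getD_of_mem {l : List Int} {v : Int} (hv : v ∈ l) :
    (l.foldl pvStep PySem.Dict.empty).getD v [] = pvColorOf v := by
  exact good_foldl_pvStep l (by intro k hk; simp [PySem.Dict.contains_empty] at hk) v
    (contains_foldl_pvStep_of_mem hv _)

-- (pyRange 0 t).map (row[·]) is row.take t when t ≤ len row
lemma map_pyGetD_range_take (row : List Int) (t : Nat) (ht : t ≤ row.length) :
    (PySem.List.pyRange 0 (t : Int) 1).map (fun y => PySem.List.pyGetD row y 0) = row.take t := by
  apply List.ext_getElem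
  · simp [PySem.List.length_pyRange_one, ht]
  · intro k hk hk'
    have hkt : k < t := by
      simpa [PySem.List.length_pyRange_one] using hk
    rw [List.getElem_map, PySem.List.getElem_pyRange_one, List.getElem_take]
    have h0 : (0 : Int) + (k : Nat) = ((k : Nat) : Int) := by omega
    rw [h0, PySem.List.pyGetD_natCast]
    exact List.getD_eq_getElem row 0 (by omega)

theorem to_refined_type_spec : Claim_equal_to_refined_type := by
  intro g _ hpre
  show to_refined_type g = to_refined_type_alt g
  unfold to_refined_type to_refined_type_alt
  simp only [PySem.List.foldl_append_singleton_eq_map, List.nil_append]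
  have hlen : PySem.List.len g = (g.length : Int) := by simp [PySem.List.len]
  -- A's outer index loop is a map over the rows of g
  rw [show (fun x => (PySem.List.pyRange 0 (PySem.List.len g) 1).map (fun y =>
        let v := PySem.List.pyGetD (PySem.List.pyGetD g x []) y 0
        if v < 90 then SEA else if v < 100 then DENSELY_POPULATED
        else if v < 120 then MODERATELY_POPULATED else if v < 140 then LOOSELY_POPULATED
        else if v < 180 then DESERT else if v < 200 then LOOSELY_POPULATED else MOUNTAIN))
      = (fun row => (PySem.List.pyRange 0 (PySem.List.len g) 1).map
          (fun y => pvChain (PySem.List.pyGetD row y 0)))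
        ∘ (fun x => PySem.List.pyGetD g x []) from rfl]
  rw [← List.map_map, PySem.List.map_pyGetD_pyRange_zero]
  apply List.map_congr_left
  intro row hrow
  -- A's inner index loop reads exactly row.take g.length
  rw [show (fun y => pvChain (PySem.List.pyGetD row y 0))
      = pvChain ∘ (fun y => PySem.List.pyGetD row y 0) from rfl]
  rw [← List.map_map, hlen, map_pyGetD_range_take row g.length (hpre row hrow)]
  simp only [PySem.List.slice_to_natCast]
  apply List.map_congr_left
  intro v hv
  -- the memo answers A's chain on every value that occurs in the sliced grid
  show pvChain v
      = (g.foldl (fun c row => (row.take g.length).foldl pvStep c) PySem.Dict.empty).getD v []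
  rw [← List.foldl_flatMap]
  have hflat : v ∈ g.flatMap (fun row => row.take g.length) :=
    List.mem_flatMap.mpr ⟨row, hrow, hv⟩
  rw [cache_getD_of_mem hflat, colorOf_eq_chain]
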